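-- pv_equiv track=rewrite | github.com/EvanZhuang/test_time_recursive_thinking | AIME/scripts/vllm_oss_markovian_thinking.py | get_last_integer
-- ===== SOURCE A (Python) =====
-- def get_last_integer(text):
--     """Extract the last integer from text, searching backwards. Handles negative numbers."""
--     i = len(text) - 1
--     while i >= 0:
--         if text[i].isdigit():
--             # We've found a digit; now move backwards to locate the start
--             end = i
--             while i >= 0 and text[i].isdigit():
--                 i -= 1
--             # Check if there's a '-' immediately before the digits
--             if i >= 0 and text[i] == '-':
--                 return text[i:end+1]
--             else:
--                 return text[i+1:end+1]
--         i -= 1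
--     return None
-- ===== SOURCE B (Python) =====
-- def get_last_integer(text):
--     """Forward single pass: collect every (possibly '-'-signed) digit run, return the last one."""
--     tokens = []
--     n = len(text)
--     i = 0
--     while i < n:
--         if text[i].isdigit():
--             start = i
--             while i < n and text[i].isdigit():
--                 i += 1
--             if start > 0 and text[start - 1] == '-':
--                 tokens.append(text[start - 1:i])
--             else:
--                 tokens.append(text[start:i])
--         else:
--             i += 1
--     return tokens[-1] if tokens else None
-- ===== Notes on version B (the rewrite author's own statement) =====
-- stated objective: alternative
-- what changed: A scans the string backwards character by character and returns at the first digit run found; B makes one forward pass that collects every (possibly '-'-prefixed) digit-run token into a list and returns the last one.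
import Mathlib
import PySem

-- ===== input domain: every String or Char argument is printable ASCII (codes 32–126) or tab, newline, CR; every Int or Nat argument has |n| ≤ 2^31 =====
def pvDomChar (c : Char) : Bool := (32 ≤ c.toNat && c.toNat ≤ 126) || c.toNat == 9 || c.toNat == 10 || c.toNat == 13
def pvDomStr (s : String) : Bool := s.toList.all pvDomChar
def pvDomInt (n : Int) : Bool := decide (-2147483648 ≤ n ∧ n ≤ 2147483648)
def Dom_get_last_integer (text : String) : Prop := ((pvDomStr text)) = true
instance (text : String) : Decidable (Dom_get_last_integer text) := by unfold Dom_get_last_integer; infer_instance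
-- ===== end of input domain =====

-- B replaces A's backward index scan by a forward single pass that collects every signed
-- digit run and returns the last one (objective: alternative decomposition, same cost).

-- ===== PORT A =====
-- A walks i from len(text)-1 down to 0; traversing text.toList.reverse element by element
-- is that same walk (i -= 1 = step to the next element of the reversed list); the inner
-- backward while-loop over digits is takeWhile/dropWhile on the reversed list, and the
-- returned slices text[i:end+1] / text[i+1:end+1] are the collected digits (re-reversed),
-- with the '-' prefixed exactly when the element following the run in the reversed list
-- (= the character just before the run in text) is '-'.
def goA : List Char → Option String
  | [] => none
  | c :: rest =>
    if PySem.Chars.isdigit c then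
      -- inner while: move backwards over the digits
      let digs := List.takeWhile PySem.Chars.isdigit (c :: rest)
      -- `if i >= 0 and text[i] == '-'`
      match List.dropWhile PySem.Chars.isdigit (c :: rest) with
      | '-' :: _ => some (String.ofList ('-' :: digs.reverse))
      | _ => some (String.ofList digs.reverse)
    else goA rest

def get_last_integer (text : String) : Option String :=
  goA text.toList.reverse

-- ===== PORT B =====
-- forward pass of Source B: `prev` is the character just before the current position
-- (text[start-1]); each maximal digit run appends one token; last token wins.
def goB : List Char → Option Char → List String
  | [], _ => []
  | c :: rest, prev =>
    if PySem.Chars.isdigit c then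
      let digs := c :: List.takeWhile PySem.Chars.isdigit rest
      let tok := if prev = some '-' then String.ofList ('-' :: digs) else String.ofList digs
      -- continue after the run (prev becomes a digit; it is overwritten by the
      -- intervening non-digit before any later run can consult it)
      tok :: goB (List.dropWhile PySem.Chars.isdigit rest) (some c)
    else goB rest (some c)
termination_by cs _ => cs.length
decreasing_by
  · exact Nat.lt_succ_of_le (List.length_dropWhile_le _ _)
  · simp

def get_last_integer_alt (text : String) : Option String :=
  (goB text.toList none).getLast?

-- ===== PRECONDITION & SPEC =====
def Spec_get_last_integer (text : String) (out : Option String) : Prop := out = get_last_integer_alt text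
instance (text : String) (out : Option String) : Decidable (Spec_get_last_integer text out) := by unfold Spec_get_last_integer; infer_instance

-- ===== CLAIM (what is proved, stated in full; the proofs are below) =====
def Claim_equal_get_last_integer : Prop := ∀ (text : String), Dom_get_last_integer text → Spec_get_last_integer text (get_last_integer text)

-- ===== LEMMAS AND PROOFS =====

-- "non-digit", the skipping predicate of A's outer loop
def ndg (c : Char) : Bool := !PySem.Chars.isdigit c

-- the common closed form of both results: the last digit run of cs is the head run of
-- cs.reverse after skipping non-digits; p is the character preceding cs (if any).
def lastTok (cs : List Char) (p : Option Char) : Option String :=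
  match List.dropWhile ndg cs.reverse with
  | [] => none
  | l' =>
    if ((List.dropWhile PySem.Chars.isdigit l').head?.or p) = some '-' then
      some (String.ofList ('-' :: (List.takeWhile PySem.Chars.isdigit l').reverse))
    else
      some (String.ofList (List.takeWhile PySem.Chars.isdigit l').reverse)

lemma lastTok_nil {cs : List Char} {p : Option Char}
    (h : List.dropWhile ndg cs.reverse = []) : lastTok cs p = none := by
  unfold lastTok; rw [h]

lemma lastTok_eq {cs : List Char} {p : Option Char} {l' : List Char}
    (h : List.dropWhile ndg cs.reverse = l') (hne : l' ≠ []) :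
    lastTok cs p =
      if ((List.dropWhile PySem.Chars.isdigit l').head?.or p) = some '-' then
        some (String.ofList ('-' :: (List.takeWhile PySem.Chars.isdigit l').reverse))
      else
        some (String.ofList (List.takeWhile PySem.Chars.isdigit l').reverse) := by
  unfold lastTok; rw [h]
  rcases l' with _ | ⟨x, xs⟩
  · exact absurd rfl hne
  · rfl

-- A's scan over a (reversed) list, as a closed form
lemma goA_eq (l : List Char) :
    goA l = (match List.dropWhile ndg l with
      | [] => none
      | l' =>
        if (List.dropWhile PySem.Chars.isdigit l').head? = some '-' then
          some (String.ofList ('-' :: (List.takeWhile PySem.Chars.isdigit l').reverse))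
        else
          some (String.ofList (List.takeWhile PySem.Chars.isdigit l').reverse)) := by
  induction l with
  | nil => simp [goA]
  | cons c rest ih =>
    by_cases h : PySem.Chars.isdigit c
    · have h1 : List.dropWhile ndg (c :: rest) = c :: rest :=
        List.dropWhile_cons_of_neg (by simp [ndg, h])
      rw [h1]
      simp only [goA, if_pos h]
      rcases hd : List.dropWhile PySem.Chars.isdigit (c :: rest) with _ | ⟨x, xs⟩
      · simp
      · by_cases hx : x = '-' <;> simp [hx]
    · have h1 : List.dropWhile ndg (c :: rest) = List.dropWhile ndg rest :=
        List.dropWhile_cons_of_pos (by simp [ndg, h])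
      rw [h1, ← ih]
      simp only [goA, if_neg h]

-- if u has no digit, B produces no token on u
lemma goB_nil_of_no_digit : ∀ (u : List Char) (p : Option Char),
    (∀ x ∈ u, PySem.Chars.isdigit x = false) → goB u p = [] := by
  intro u
  induction u with
  | nil => intro p _; simp [goB]
  | cons c rest ih =>
    intro p h
    rw [goB, if_neg (by simp [h c (by simp)])]
    exact ih _ fun x hx => h x (by simp [hx])

-- if u contains a digit, B produces at least one token on u
lemma goB_ne_nil_of_digit : ∀ (u : List Char) (p : Option Char),
    (∃ d ∈ u, PySem.Chars.isdigit d = true) → goB u p ≠ [] := by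
  intro u
  induction u with
  | nil => intro p h; simp at h
  | cons c rest ih =>
    intro p h
    rw [goB]
    by_cases hc : PySem.Chars.isdigit c
    · simp [hc]
    · rw [if_neg hc]
      obtain ⟨d, hd, hdig⟩ := h
      rcases List.mem_cons.mp hd with rfl | hd
      · exact absurd hdig (by simpa using hc)
      · exact ih _ ⟨d, hd, hdig⟩

lemma takeWhile_append_of_exists_not {u v : List Char}
    (h : ∃ x ∈ u, PySem.Chars.isdigit x = false) :
    List.takeWhile PySem.Chars.isdigit (u ++ v) = List.takeWhile PySem.Chars.isdigit u := by
  rw [List.takeWhile_append, if_neg]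
  intro hlen
  obtain ⟨x, hx, hnd⟩ := h
  have : List.takeWhile PySem.Chars.isdigit u = u :=
    (List.takeWhile_prefix _).eq_of_length hlen
  have := List.takeWhile_eq_self_iff.mp this x hx
  simp [this] at hnd

lemma dropWhile_append_of_ne_nil {p : Char → Bool} {u v : List Char}
    (h : List.dropWhile p u ≠ []) :
    List.dropWhile p (u ++ v) = List.dropWhile p u ++ v := by
  rw [List.dropWhile_append, if_neg]
  simp [h]

lemma dropWhile_append_of_nil {p : Char → Bool} {u v : List Char}
    (h : List.dropWhile p u = []) :
    List.dropWhile p (u ++ v) = List.dropWhile p v := by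
  rw [List.dropWhile_append, if_pos]
  simp [h]

lemma dropWhile_eq_self_of_all {u : List Char}
    (h : ∀ x ∈ u, PySem.Chars.isdigit x = true) : List.dropWhile ndg u = u := by
  rcases u with _ | ⟨a, t⟩
  · rfl
  · exact List.dropWhile_cons_of_neg (by simp [ndg, h a (by simp)])

-- head of a nonempty dropWhile fails the predicate
lemma head_dropWhile_false {p : Char → Bool} {u : List Char} {a : Char}
    (h : (List.dropWhile p u).head? = some a) : p a = false := by
  have := List.head?_dropWhile_not p u
  rw [h] at this
  exact this

-- a nonempty dropWhile keeps the last element of the list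
lemma getLast?_dropWhile {p : Char → Bool} {u : List Char}
    (h : List.dropWhile p u ≠ []) : (List.dropWhile p u).getLast? = u.getLast? := by
  obtain ⟨t, ht⟩ := List.dropWhile_suffix (l := u) p
  conv_rhs => rw [← ht]
  rw [List.getLast?_append]
  rcases hx : (List.dropWhile p u).getLast? with _ | x
  · simp [List.getLast?_eq_none_iff.mp hx] at h
  · simp

-- the digit run that B consumes in one step: c :: rest = digs ++ r
lemma run_split (c : Char) (rest : List Char) :
    c :: rest = (c :: List.takeWhile PySem.Chars.isdigit rest) ++
      List.dropWhile PySem.Chars.isdigit rest := by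
  simp [List.takeWhile_append_dropWhile]

-- main loop invariant: the last token of B's forward pass is lastTok
lemma goB_lastTok : ∀ (n : ℕ) (cs : List Char), cs.length ≤ n → ∀ (p : Option Char),
    (goB cs p).getLast? = lastTok cs p := by
  intro n
  induction n with
  | zero =>
    intro cs hcs p
    rw [List.length_eq_zero_iff.mp (Nat.le_zero.mp hcs)]
    simp [goB, lastTok]
  | succ n ih =>
    intro cs hcs p
    rcases cs with _ | ⟨c, rest⟩
    · simp [goB, lastTok]
    · have hlen : rest.length ≤ n := by simpa using hcs
      by_cases h : PySem.Chars.isdigit c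
      · -- a digit run starts here
        set digs := c :: List.takeWhile PySem.Chars.isdigit rest with hdigs
        set r := List.dropWhile PySem.Chars.isdigit rest with hr
        have hall : ∀ x ∈ digs, PySem.Chars.isdigit x = true := by
          intro x hx
          rcases List.mem_cons.mp hx with rfl | hx
          · exact h
          · exact List.mem_takeWhile_imp hx
        have hrev : (c :: rest).reverse = r.reverse ++ digs.reverse := by
          conv_lhs => rw [run_split c rest]
          rw [List.reverse_append]
        rw [goB, if_pos h]
        by_cases hnil : List.dropWhile ndg r.reverse = []
        · -- no further digit: the token just produced is the answer
          have hno : ∀ x ∈ r, PySem.Chars.isdigit x = false := by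
            intro x hx
            have := List.dropWhile_eq_nil_iff.mp hnil x (List.mem_reverse.mpr hx)
            simpa [ndg] using this
          rw [goB_nil_of_no_digit r _ hno]
          have hl' : List.dropWhile ndg (c :: rest).reverse = digs.reverse := by
            rw [hrev, dropWhile_append_of_nil hnil,
              dropWhile_eq_self_of_all (by intro x hx; exact hall x (List.mem_reverse.mp hx))]
          rw [lastTok_eq hl' (by simp [hdigs])]
          have htw : List.takeWhile PySem.Chars.isdigit digs.reverse = digs.reverse :=
            List.takeWhile_eq_self_iff.mpr
              (by intro y hy; exact hall y (List.mem_reverse.mp hy))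
          have hdw : List.dropWhile PySem.Chars.isdigit digs.reverse = [] :=
            List.dropWhile_eq_nil_iff.mpr
              (by intro y hy; exact hall y (List.mem_reverse.mp hy))
          rw [htw, hdw, List.reverse_reverse]
          by_cases hp : p = some '-' <;> simp [hp, hdigs]
        · -- there is a later digit run: the token is overridden by the recursive tail
          have hdr : ∃ d ∈ r, PySem.Chars.isdigit d = true := by
            rcases hq : List.dropWhile ndg r.reverse with _ | ⟨q, qs⟩
            · exact absurd hq hnil
            have hqm : q ∈ r.reverse := (List.dropWhile_suffix ndg).mem (by rw [hq]; simp)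
            have : ndg q = false := head_dropWhile_false (by rw [hq]; rfl)
            exact ⟨q, List.mem_reverse.mp hqm, by simpa [ndg] using this⟩
          have htail : goB r (some c) ≠ [] := goB_ne_nil_of_digit r _ hdr
          have hlast : (goB r (some c)).getLast? = lastTok r (some c) :=
            ih r (le_trans (List.length_dropWhile_le _ _) hlen) (some c)
          -- last of (tok :: tail) = last of tail
          rcases hg : goB r (some c) with _ | ⟨t0, ts⟩
          · exact absurd hg htail
          have hstep : ∀ tok : String, (tok :: t0 :: ts).getLast? = (t0 :: ts).getLast? := by
            intro tok
            rw [List.getLast?_cons (a := tok), List.getLast?_cons (a := t0)]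
            simp
          rw [hstep, ← hg, hlast]
          -- now show lastTok (c :: rest) p = lastTok r (some c)
          -- r is nonempty and starts with a non-digit
          have hrne : r ≠ [] := by
            intro hc; rw [hc] at hnil; simp at hnil
          obtain ⟨rh, rt, hrht⟩ := List.exists_cons_of_ne_nil hrne
          have hrh : PySem.Chars.isdigit rh = false := by
            have : (List.dropWhile PySem.Chars.isdigit rest).head? = some rh := by
              rw [← hr, hrht]; rfl
            exact head_dropWhile_false this
          -- the last element of l'' := dropWhile ndg r.reverse is rh, a non-digit
          have hgl : (List.dropWhile ndg r.reverse).getLast? = some rh := by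
            rw [getLast?_dropWhile hnil, List.getLast?_reverse, hrht]; rfl
          have hrhm : rh ∈ List.dropWhile ndg r.reverse := by
            obtain ⟨ys, hys⟩ := List.getLast?_eq_some_iff.mp hgl
            rw [hys]; simp
          have hdd : List.dropWhile PySem.Chars.isdigit (List.dropWhile ndg r.reverse) ≠ [] := by
            intro hc
            have := List.dropWhile_eq_nil_iff.mp hc rh hrhm
            simp [hrh] at this
          have hl' : List.dropWhile ndg (c :: rest).reverse =
              List.dropWhile ndg r.reverse ++ digs.reverse := by
            rw [hrev, dropWhile_append_of_ne_nil hnil]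
          rw [lastTok_eq (p := some c) rfl hnil,
            lastTok_eq (p := p) hl' (by simp [hnil])]
          have htw : List.takeWhile PySem.Chars.isdigit (List.dropWhile ndg r.reverse ++ digs.reverse)
              = List.takeWhile PySem.Chars.isdigit (List.dropWhile ndg r.reverse) :=
            takeWhile_append_of_exists_not ⟨rh, hrhm, hrh⟩
          have hdw : List.dropWhile PySem.Chars.isdigit (List.dropWhile ndg r.reverse ++ digs.reverse)
              = List.dropWhile PySem.Chars.isdigit (List.dropWhile ndg r.reverse) ++ digs.reverse :=
            dropWhile_append_of_ne_nil hdd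
          rw [htw, hdw, List.head?_append]
          obtain ⟨a, ha⟩ : ∃ a,
              (List.dropWhile PySem.Chars.isdigit (List.dropWhile ndg r.reverse)).head? = some a := by
            rcases hh : (List.dropWhile PySem.Chars.isdigit (List.dropWhile ndg r.reverse)).head? with _ | a
            · exact absurd (List.head?_eq_none_iff.mp hh) hdd
            · exact ⟨a, rfl⟩
          rw [ha]
          simp [Option.some_or]
      · -- a non-digit: B steps past it, remembering it as prev
        rw [goB, if_neg h]
        rw [ih rest hlen (some c)]
        -- lastTok (c :: rest) p = lastTok rest (some c)
        have hrev : (c :: rest).reverse = rest.reverse ++ [c] := by simp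
        have hdc : List.dropWhile ndg [c] = [] := by
          rw [List.dropWhile_cons_of_pos (by simp [ndg, h])]; rfl
        by_cases hm : List.dropWhile ndg rest.reverse = []
        · rw [lastTok_nil (cs := rest) (p := some c) hm,
            lastTok_nil (cs := c :: rest) (p := p)
              (by rw [hrev, dropWhile_append_of_nil hm]; exact hdc)]
        · have hl' : List.dropWhile ndg (c :: rest).reverse =
              List.dropWhile ndg rest.reverse ++ [c] := by
            rw [hrev, dropWhile_append_of_ne_nil hm]
          rw [lastTok_eq (p := p) hl' (by simp), lastTok_eq (p := some c) rfl hm]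
          have htw : List.takeWhile PySem.Chars.isdigit (List.dropWhile ndg rest.reverse ++ [c])
              = List.takeWhile PySem.Chars.isdigit (List.dropWhile ndg rest.reverse) := by
            rw [List.takeWhile_append]
            by_cases hlen2 : (List.takeWhile PySem.Chars.isdigit (List.dropWhile ndg rest.reverse)).length
                = (List.dropWhile ndg rest.reverse).length
            · rw [if_pos hlen2, List.takeWhile_cons_of_neg (by simp [h]),
                List.append_nil,
                (List.takeWhile_prefix _).eq_of_length hlen2]
            · rw [if_neg hlen2]
          have hdw : List.dropWhile PySem.Chars.isdigit (List.dropWhile ndg rest.reverse ++ [c])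
              = List.dropWhile PySem.Chars.isdigit (List.dropWhile ndg rest.reverse) ++ [c] := by
            rw [List.dropWhile_append]
            by_cases he : (List.dropWhile PySem.Chars.isdigit (List.dropWhile ndg rest.reverse)).isEmpty
            · rw [if_pos he, List.dropWhile_cons_of_neg (by simp [h]),
                List.isEmpty_iff.mp he]; rfl
            · rw [if_neg he]
          rw [htw, hdw, List.head?_append]
          simp only [List.head?_cons, Option.or_assoc, Option.some_or]

-- ===== VERDICT (by name: the statement is the Claim_ definition above) =====
theorem get_last_integer_spec : Claim_equal_get_last_integer := by
  intro text _
  unfold Spec_get_last_integer get_last_integer get_last_integer_alt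
  rw [goA_eq, goB_lastTok text.toList.length text.toList le_rfl none]
  unfold lastTok
  rcases h : List.dropWhile ndg text.toList.reverse with _ | ⟨x, xs⟩
  · rfl
  · simp [Option.or_none]
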